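-- pv_equiv track=rewrite | github.com/hauptmann1971/b2b-contact-miner | services/crawler_service.py | _calculate_link_priority
-- ===== SOURCE A (Python) =====
-- def _calculate_link_priority(url: str) -> int:
--     """Calculate priority score for a link (1-10)"""
--     url_lower = url.lower()
--
--     if any(path in url_lower for path in ['/contact', '/contacts', '/contact-us']):
--         return 10
--
--     if any(path in url_lower for path in ['/about', '/about-us', '/company']):
--         return 9
--
--     if any(path in url_lower for path in ['/team', '/our-team', '/leadership']):
--         return 8
--
--     if any(path in url_lower for path in ['/impressum', '/legal', '/privacy']):
--         return 6
--
--     if any(path in url_lower for path in ['/services', '/products', '/solutions']):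
--         return 4
--
--     if any(path in url_lower for path in ['/blog', '/news', '/articles']):
--         return 2
--
--     return 1
-- ===== SOURCE B (Python) =====
-- _KEYWORD_SCORES = {
--     '/contact': 10, '/contacts': 10, '/contact-us': 10,
--     '/about': 9, '/about-us': 9, '/company': 9,
--     '/team': 8, '/our-team': 8, '/leadership': 8,
--     '/impressum': 6, '/legal': 6, '/privacy': 6,
--     '/services': 4, '/products': 4, '/solutions': 4,
--     '/blog': 2, '/news': 2, '/articles': 2,
-- }
--
-- def _calculate_link_priority(url: str) -> int:
--     """Calculate priority score for a link (1-10)"""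
--     url_lower = url.lower()
--     return max((s for kw, s in _KEYWORD_SCORES.items() if kw in url_lower), default=1)
-- ===== Notes on version B (the rewrite author's own statement) =====
-- stated objective: alternative
-- what changed: Replaces the ordered early-return cascade of six conditional blocks by an order-independent aggregation: a flat keyword-to-score dict and one max() over all matching keywords (default 1); correct because A's groups are checked in strictly descending score order, so A's answer equals the maximum matching score.
import Mathlib
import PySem

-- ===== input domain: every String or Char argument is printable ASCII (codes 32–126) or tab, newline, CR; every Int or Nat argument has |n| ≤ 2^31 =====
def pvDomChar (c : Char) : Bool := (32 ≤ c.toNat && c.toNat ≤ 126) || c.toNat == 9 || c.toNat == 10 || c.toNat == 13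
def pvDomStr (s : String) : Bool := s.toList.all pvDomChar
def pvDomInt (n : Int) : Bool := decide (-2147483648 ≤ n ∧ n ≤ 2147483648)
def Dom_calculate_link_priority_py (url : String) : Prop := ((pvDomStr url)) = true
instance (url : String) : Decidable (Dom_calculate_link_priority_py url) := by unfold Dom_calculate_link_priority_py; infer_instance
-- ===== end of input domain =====

-- B replaces A's ordered early-return cascade by an order-independent max over a flat keyword→score dict (objective: alternative).

-- ===== PORT A =====
def calculate_link_priority_py (url : String) : Int :=
  let url_lower := PySem.Str.lower url
  if ["/contact", "/contacts", "/contact-us"].any (fun path => PySem.Str.isIn path url_lower) then 10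
  else if ["/about", "/about-us", "/company"].any (fun path => PySem.Str.isIn path url_lower) then 9
  else if ["/team", "/our-team", "/leadership"].any (fun path => PySem.Str.isIn path url_lower) then 8
  else if ["/impressum", "/legal", "/privacy"].any (fun path => PySem.Str.isIn path url_lower) then 6
  else if ["/services", "/products", "/solutions"].any (fun path => PySem.Str.isIn path url_lower) then 4
  else if ["/blog", "/news", "/articles"].any (fun path => PySem.Str.isIn path url_lower) then 2
  else 1

-- ===== PORT B =====
-- the _KEYWORD_SCORES dict, in insertion order
def pvKeywordScores : List (String × Int) :=
  [("/contact", 10), ("/contacts", 10), ("/contact-us", 10),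
   ("/about", 9), ("/about-us", 9), ("/company", 9),
   ("/team", 8), ("/our-team", 8), ("/leadership", 8),
   ("/impressum", 6), ("/legal", 6), ("/privacy", 6),
   ("/services", 4), ("/products", 4), ("/solutions", 4),
   ("/blog", 2), ("/news", 2), ("/articles", 2)]

-- max((s for kw, s in _KEYWORD_SCORES.items() if kw in url_lower), default=1)
def calculate_link_priority_py_alt (url : String) : Int :=
  let url_lower := PySem.Str.lower url
  let matched := pvKeywordScores.filterMap
    (fun p => if PySem.Str.isIn p.1 url_lower then some p.2 else none)
  match PySem.List.max? matched (fun x => x) with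
  | some m => m
  | none => 1

-- ===== PRECONDITION & SPEC =====
def Spec_calculate_link_priority_py (url : String) (out : Int) : Prop := out = calculate_link_priority_py_alt url
instance (url : String) (out : Int) : Decidable (Spec_calculate_link_priority_py url out) := by unfold Spec_calculate_link_priority_py; infer_instance

-- ===== CLAIM =====
def Claim_equal_calculate_link_priority_py : Prop := ∀ (url : String), Dom_calculate_link_priority_py url → Spec_calculate_link_priority_py url (calculate_link_priority_py url)

-- ===== LEMMAS AND PROOFS =====

-- proof-only helper: A's cascade as a first-match scan over the flat table
def pvFirstMatch (u : String) : List (String × Int) → Int → Int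
  | [], a => a
  | (kw, s) :: rest, a =>
      if PySem.Str.isIn kw u then s else pvFirstMatch u rest a

theorem pv_foldl_max_const (l : List Int) (a : Int) (h : ∀ x ∈ l, x ≤ a) :
    l.foldl max a = a := by
  induction l with
  | nil => rfl
  | cons x t ih =>
      simp only [List.foldl_cons]
      have hx : x ≤ a := h x (by simp)
      rw [max_eq_left hx]
      exact ih (fun y hy => h y (by simp [hy]))

theorem pv_max_eq_first (u : String) :
    ∀ (T : List (String × Int)) (a : Int),
      T.Pairwise (fun p q => q.2 ≤ p.2) →
      (∀ p ∈ T, a ≤ p.2) →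
      (match PySem.List.max?
          (T.filterMap (fun p => if PySem.Str.isIn p.1 u then some p.2 else none))
          (fun x => x) with
       | some m => m
       | none => a) = pvFirstMatch u T a := by
  intro T
  induction T with
  | nil => intro a _ _; simp [PySem.List.max?, pvFirstMatch]
  | cons p rest ih =>
      intro a hpw hb
      obtain ⟨kw, s⟩ := p
      have hpw' := (List.pairwise_cons.mp hpw)
      by_cases hin : PySem.Str.isIn kw u
      · simp only [List.filterMap_cons, hin, if_pos, pvFirstMatch]
        rw [PySem.List.max?_id_cons]
        simp only []
        apply pv_foldl_max_const
        intro x hx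
        obtain ⟨q, hq, hqe⟩ := List.mem_filterMap.mp hx
        have hx2 : x = q.2 := by
          split at hqe
          · exact (Option.some.inj hqe).symm
          · exact absurd hqe (by simp)
        subst hx2
        exact hpw'.1 q hq
      · simp only [List.filterMap_cons, hin, pvFirstMatch, Bool.false_eq_true, if_false]
        exact ih a hpw'.2 (fun q hq => hb q (by simp [hq]))

theorem pv_if_or (a b : Bool) (x y : Int) :
    (if (a || b) = true then x else y) = if a = true then x else if b = true then x else y := by
  cases a <;> cases b <;> simp

theorem pvA_eq_first (url : String) :
    calculate_link_priority_py url
      = pvFirstMatch (PySem.Str.lower url) pvKeywordScores 1 := by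
  unfold calculate_link_priority_py pvKeywordScores
  simp only [List.any_cons, List.any_nil, Bool.or_false, pv_if_or, pvFirstMatch]

-- ===== VERDICT =====
theorem calculate_link_priority_py_spec : Claim_equal_calculate_link_priority_py := by
  intro url _
  unfold Spec_calculate_link_priority_py
  rw [pvA_eq_first]
  unfold calculate_link_priority_py_alt
  exact (pv_max_eq_first (PySem.Str.lower url) pvKeywordScores 1
    (by unfold pvKeywordScores; decide) (by unfold pvKeywordScores; decide)).symm
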